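-- pv_equiv track=rewrite | github.com/Dnafivuq/Order-and-Chaos | Bot.py | _split_array_into_subarrays
-- ===== SOURCE A (Python) =====
-- def _split_array_into_subarrays(array: list[int]) -> list[list[int]]:
--     """
--     Splits array into arrays based on values.
--     Splits based on cell values - into longes subarrays of same value
--     i.e. [0, 0, 0, 1, 1, 2, 0, 0] -> [[0,0,0], [1,1], [2], [0, 0]]
--
--     Raises
--     ------
--     ValueError
--         If array lenght is equal to zero
--
--     Parameters
--     ----------
--     array: list[int]
--         Array to split into smaller same value arrays
--
--     Returns
--     -------
--     list[list[int]]
--         List of subbarrays of same value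
--     """
--
--     array_of_subarrays = []
--     subarray = []
--     if len(array) == 0:
--         raise ValueError
--     for cell_index, cell_value in enumerate(array):
--         if not subarray:
--             subarray.append(cell_value)
--         else:
--             if cell_value == subarray[0]:
--                 subarray.append(cell_value)
--             else:
--                 array_of_subarrays.append(list(subarray))
--                 subarray = []
--                 subarray.append(cell_value)
--         if cell_index == len(array) - 1:  # end of array, add last subarray to list fo arrays
--             array_of_subarrays.append(list(subarray))
--     return array_of_subarrays
-- ===== SOURCE B (Python) =====
-- def _split_array_into_subarrays(array: list[int]) -> list[list[int]]:
--     if len(array) == 0: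
--         raise ValueError
--     n = len(array)
--     # phase 1: cut positions where a run ends (exclusive end indices)
--     cuts = [i + 1 for i in range(n - 1) if array[i] != array[i + 1]]
--     cuts.append(n)
--     # phase 2: slice the array between consecutive cut points
--     out = []
--     start = 0
--     for c in cuts:
--         out.append(array[start:c])
--         start = c
--     return out
-- ===== Notes on version B (the rewrite author's own statement) =====
-- stated objective: alternative
-- what changed: Replaces the single accumulating run-building loop by a two-phase algorithm: one pass collects the boundary indices where adjacent values differ, a second pass slices the array between consecutive cut points.
import Mathlib
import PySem

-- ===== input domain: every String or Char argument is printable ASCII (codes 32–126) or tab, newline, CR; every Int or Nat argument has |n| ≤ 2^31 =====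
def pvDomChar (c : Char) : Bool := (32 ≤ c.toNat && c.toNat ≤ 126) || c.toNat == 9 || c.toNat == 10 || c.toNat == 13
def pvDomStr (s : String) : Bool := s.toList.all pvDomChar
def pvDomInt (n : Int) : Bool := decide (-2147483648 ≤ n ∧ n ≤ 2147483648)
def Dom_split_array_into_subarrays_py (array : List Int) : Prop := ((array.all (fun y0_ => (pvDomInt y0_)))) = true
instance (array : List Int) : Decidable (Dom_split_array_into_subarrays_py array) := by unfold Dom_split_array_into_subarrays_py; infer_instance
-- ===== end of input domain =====

-- B replaces A's single accumulating run-building loop by a two-phase algorithm (collect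
-- boundary indices, then slice between consecutive cuts); same O(n) cost ("alternative").
-- Both programs raise ValueError on the empty list, which Pre_ excludes.

-- ===== PORT A =====
-- one loop step of A's for-loop body (the part before the end-of-array check)
def pvStepA (st : List (List Int) × List Int) (v : Int) : List (List Int) × List Int :=
  if st.2.isEmpty then (st.1, st.2 ++ [v])
  else if v = st.2.headD 0 then (st.1, st.2 ++ [v])  -- subarray[0]: st.2 is nonempty in this branch
  else (st.1 ++ [st.2], [v])

def split_array_into_subarrays_py (array : List Int) : List (List Int) :=
  if array.length = 0 then []  -- Python: raise ValueError (excluded by Pre_)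
  else
    ((PySem.List.enumerate array 0).foldl
      (fun (st : List (List Int) × List Int) (p : Int × Int) =>
        let st' := pvStepA st p.2
        if p.1 = (array.length : Int) - 1 then (st'.1 ++ [st'.2], st'.2) else st')
      ([], [])).1

-- ===== PORT B =====
-- cuts = [i + 1 for i in range(n - 1) if array[i] != array[i + 1]]
def pvCutsB (array : List Int) : List Int :=
  ((PySem.List.pyRange 0 ((array.length : Int) - 1) 1).filter
      (fun i => PySem.List.pyGet? array i ≠ PySem.List.pyGet? array (i + 1))).map (· + 1)

-- the second loop: out.append(array[start:c]); start = c
def pvSliceFoldB (array : List Int) (cuts : List Int) : List (List Int) × Int :=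
  cuts.foldl (fun st c => (st.1 ++ [PySem.List.slice array (some st.2) (some c)], c)) ([], 0)

def split_array_into_subarrays_py_alt (array : List Int) : List (List Int) :=
  if array.length = 0 then []  -- Python: raise ValueError (excluded by Pre_)
  else (pvSliceFoldB array (pvCutsB array ++ [(array.length : Int)])).1

-- ===== PRECONDITION & SPEC =====
-- Pre_ excludes exactly the empty list, on which A raises ValueError.
def Pre_split_array_into_subarrays_py (array : List Int) : Prop := array ≠ []
instance (array : List Int) : Decidable (Pre_split_array_into_subarrays_py array) := by
  unfold Pre_split_array_into_subarrays_py; infer_instance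

def pvWitness_split_array_into_subarrays_py : List Int := [0, 0, 1, 2, 2]

def Spec_split_array_into_subarrays_py (array : List Int) (out : List (List Int)) : Prop :=
  out = split_array_into_subarrays_py_alt array
instance (array : List Int) (out : List (List Int)) : Decidable (Spec_split_array_into_subarrays_py array out) := by
  unfold Spec_split_array_into_subarrays_py; infer_instance

-- ===== CLAIM (what is proved, stated in full; the proofs are below) =====
def Claim_equal_split_array_into_subarrays_py : Prop :=
  ∀ (array : List Int), Dom_split_array_into_subarrays_py array →
    Pre_split_array_into_subarrays_py array →
    Spec_split_array_into_subarrays_py array (split_array_into_subarrays_py array)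

-- ===== LEMMAS AND PROOFS =====

-- canonical run decomposition, used only by the proofs
def pvRuns : List Int → List (List Int)
  | [] => []
  | [x] => [[x]]
  | x :: y :: t =>
    if x = y then
      match pvRuns (y :: t) with
      | r :: rest => (x :: r) :: rest
      | [] => []
    else [x] :: pvRuns (y :: t)

theorem pvRuns_shape (t : List Int) : ∀ x : Int, ∃ r rest, pvRuns (x :: t) = (x :: r) :: rest := by
  induction t with
  | nil => intro x; exact ⟨[], [], rfl⟩
  | cons y t ih =>
    intro x
    obtain ⟨r, rest, hr⟩ := ih y
    by_cases h : x = y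
    · exact ⟨y :: r, rest, by simp [pvRuns, h, hr]⟩
    · exact ⟨[], pvRuns (y :: t), by simp [pvRuns, h]⟩

-- A's loop without the end-of-array bookkeeping, as a recursion
def pvRunsAux : List Int → List Int → List (List Int) × List Int
  | sub, [] => ([], sub)
  | sub, v :: xs =>
    if sub.isEmpty then pvRunsAux [v] xs
    else if v = sub.headD 0 then pvRunsAux (sub ++ [v]) xs
    else ((sub :: (pvRunsAux [v] xs).1), (pvRunsAux [v] xs).2)

theorem pvFoldA_eq_runsAux (xs : List Int) : ∀ acc sub,
    xs.foldl pvStepA (acc, sub) = (acc ++ (pvRunsAux sub xs).1, (pvRunsAux sub xs).2) := by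
  induction xs with
  | nil => intro acc sub; simp [pvRunsAux]
  | cons v xs ih =>
    intro acc sub
    by_cases h : sub.isEmpty
    · simp [List.foldl_cons, pvStepA, pvRunsAux, ih, List.isEmpty_iff.mp h]
    · by_cases h2 : v = sub.head?.getD 0
      · simp [List.foldl_cons, pvStepA, h, h2, pvRunsAux, ih]
      · simp [List.foldl_cons, pvStepA, h, h2, pvRunsAux, ih]

theorem pvEnumFold (n : Int) (xs : List Int) : ∀ (off : Int) (st : List (List Int) × List Int),
    xs ≠ [] → off + (xs.length : Int) = n →
    (PySem.List.enumerate xs off).foldl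
      (fun st p => let st' := pvStepA st p.2
        if p.1 = n - 1 then (st'.1 ++ [st'.2], st'.2) else st') st
      = (fun q => (q.1 ++ [q.2], q.2)) (xs.foldl pvStepA st) := by
  induction xs with
  | nil => intro off st h; exact absurd rfl h
  | cons v xs ih =>
    intro off st _ hn
    rw [PySem.List.enumerate_cons]
    cases xs with
    | nil =>
      have hoff : off = n - 1 := by simp at hn; omega
      simp [PySem.List.enumerate_nil, hoff]
    | cons w t =>
      have hne : ¬ (off = n - 1) := by simp at hn; omega
      simp only [List.foldl_cons, hne, if_false]
      exact ih (off + 1) (pvStepA st v) (by simp) (by simp at hn ⊢; omega)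

theorem pvRunsAux_eq_runs (t : List Int) : ∀ (x : Int) (sub : List Int) r rest,
    pvRuns (x :: t) = (x :: r) :: rest →
    (pvRunsAux (x :: sub) t).1 ++ [(pvRunsAux (x :: sub) t).2] = ((x :: sub) ++ r) :: rest := by
  induction t with
  | nil =>
    intro x sub r rest h
    simp [pvRuns] at h
    simp [pvRunsAux, h.1, ← h.2]
  | cons y t ih =>
    intro x sub r rest h
    by_cases hxy : y = x
    · subst hxy
      obtain ⟨r', rest', hs⟩ := pvRuns_shape t y
      rw [pvRuns, if_pos rfl, hs] at h
      injection h with h1 h2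
      injection h1 with _ h1
      subst h1; subst h2
      have step : pvRunsAux (y :: sub) (y :: t) = pvRunsAux (y :: (sub ++ [y])) t := by
        simp [pvRunsAux]
      rw [step, ih y (sub ++ [y]) r' rest' hs]
      simp
    · rw [pvRuns, if_neg (fun hh => hxy hh.symm)] at h
      obtain ⟨r', rest', hs⟩ := pvRuns_shape t y
      injection h with h1 h2
      injection h1 with _ h1
      subst h1; subst h2
      have step : pvRunsAux (x :: sub) (y :: t) =
          ((x :: sub) :: (pvRunsAux [y] t).1, (pvRunsAux [y] t).2) := by
        simp [pvRunsAux, fun hh : y = x => hxy hh]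
      rw [step]
      have hy := ih y [] r' rest' hs
      simp only [List.cons_append, List.nil_append] at hy ⊢
      rw [hs]
      simp [hy]

theorem pvA_eq_runs (array : List Int) (h : array ≠ []) :
    split_array_into_subarrays_py array = pvRuns array := by
  obtain ⟨x, xs, rfl⟩ := List.exists_cons_of_ne_nil h
  rw [split_array_into_subarrays_py, if_neg (by simp)]
  rw [pvEnumFold ((x :: xs).length : Int) (x :: xs) 0 ([], []) h (by simp)]
  simp only []
  rw [pvFoldA_eq_runsAux (x :: xs) [] []]
  have h0 : pvRunsAux [] (x :: xs) = pvRunsAux [x] xs := by simp [pvRunsAux]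
  obtain ⟨r, rest, hs⟩ := pvRuns_shape xs x
  have hkey := pvRunsAux_eq_runs xs x [] r rest hs
  simp only [List.nil_append] at hkey ⊢
  rw [h0, hkey, hs]
  simp

-- B-side lemmas
theorem pvCutsB_nonneg (a : List Int) : ∀ c ∈ pvCutsB a ++ [(a.length : Int)], 0 ≤ c := by
  intro c hc
  rcases List.mem_append.mp hc with hc | hc
  · simp only [pvCutsB, List.mem_map, List.mem_filter] at hc
    obtain ⟨i, ⟨hi, _⟩, rfl⟩ := hc
    have := PySem.List.mem_pyRange_one.mp hi
    omega
  · simp at hc; omega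

theorem pvFoldB_acc (a : List Int) (cs : List Int) : ∀ (acc : List (List Int)) (s : Int),
    cs.foldl (fun st c => (st.1 ++ [PySem.List.slice a (some st.2) (some c)], c)) (acc, s)
      = (acc ++ (cs.foldl (fun st c => (st.1 ++ [PySem.List.slice a (some st.2) (some c)], c)) ([], s)).1,
         (cs.foldl (fun st c => (st.1 ++ [PySem.List.slice a (some st.2) (some c)], c)) ([], s)).2) := by
  induction cs with
  | nil => intro acc s; simp
  | cons c cs ih =>
    intro acc s
    simp only [List.foldl_cons]
    rw [ih (acc ++ [_]) c, ih ([] ++ [_]) c]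
    simp

theorem pvSliceShift (x : Int) (rest : List Int) (s c : Int) (hs : 0 ≤ s) (hc : 0 ≤ c) :
    PySem.List.slice (x :: rest) (some (s + 1)) (some (c + 1)) = PySem.List.slice rest (some s) (some c) := by
  rw [PySem.List.slice_toNat _ (by omega) (by omega), PySem.List.slice_toNat _ hs hc]
  have h1 : (s + 1).toNat = s.toNat + 1 := by omega
  have h2 : (c + 1).toNat = c.toNat + 1 := by omega
  simp [h1, h2]

theorem pvSliceCons (x : Int) (rest : List Int) (c : Int) (hc : 0 ≤ c) :
    PySem.List.slice (x :: rest) (some 0) (some (c + 1)) = x :: PySem.List.slice rest (some 0) (some c) := by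
  rw [PySem.List.slice_toNat _ (by omega) (by omega), PySem.List.slice_toNat _ le_rfl hc]
  have h2 : (c + 1).toNat = c.toNat + 1 := by omega
  simp [h2]

theorem pvFoldB_shift (x : Int) (rest : List Int) : ∀ (cs : List Int) (s : Int), 0 ≤ s →
    (∀ c ∈ cs, 0 ≤ c) →
    (cs.map (· + 1)).foldl (fun st c => (st.1 ++ [PySem.List.slice (x :: rest) (some st.2) (some c)], c)) ([], s + 1)
      = ((cs.foldl (fun st c => (st.1 ++ [PySem.List.slice rest (some st.2) (some c)], c)) ([], s)).1,
         (cs.foldl (fun st c => (st.1 ++ [PySem.List.slice rest (some st.2) (some c)], c)) ([], s)).2 + 1) := by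
  intro cs
  induction cs with
  | nil => intro s _ _; simp
  | cons c cs ih =>
    intro s hs hcs
    have hc : 0 ≤ c := hcs c (by simp)
    simp only [List.map_cons, List.foldl_cons]
    rw [pvSliceShift x rest s c hs hc]
    rw [pvFoldB_acc (x :: rest), pvFoldB_acc rest]
    rw [ih c hc (fun d hd => hcs d (by simp [hd]))]

theorem pvGetShift (z : Int) (l : List Int) (k : Nat) :
    PySem.List.pyGet? (z :: l) ((k : Int) + 1) = PySem.List.pyGet? l (k : Int) := by
  have h : ((k : Int) + 1) = ((k + 1 : Nat) : Int) := by push_cast; ring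
  rw [h, PySem.List.pyGet?_natCast, PySem.List.pyGet?_natCast]
  simp

theorem pvCutsB_cons (x y : Int) (t : List Int) :
    pvCutsB (x :: y :: t) = (if x = y then [] else [1]) ++ (pvCutsB (y :: t)).map (· + 1) := by
  unfold pvCutsB
  have hlen1 : ((x :: y :: t).length : Int) - 1 = ((t.length + 1 : Nat) : Int) := by
    simp only [List.length_cons]; push_cast; omega
  have hlen2 : ((y :: t).length : Int) - 1 = ((t.length : Nat) : Int) := by
    simp only [List.length_cons]; push_cast; omega
  rw [hlen1, hlen2]
  rw [PySem.List.pyRange_one, PySem.List.pyRange_one]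
  simp only [sub_zero, Int.toNat_natCast]
  rw [List.range_succ_eq_map]
  simp only [List.map_cons, List.filter_cons, List.map_map]
  have h0 : (decide (PySem.List.pyGet? (x :: y :: t) (0 + ((0:Nat):Int)) ≠ PySem.List.pyGet? (x :: y :: t) (0 + ((0:Nat):Int) + 1))) = decide (x ≠ y) := by
    have hp : (0:Int) ≤ (t.length : Int) + 1 := by positivity
    simp [PySem.List.pyGet?, PySem.List.pyIdx?, hp]
  rw [h0]
  have hcond : ∀ k ∈ List.range t.length,
      decide (PySem.List.pyGet? (x :: y :: t) ((0:Int) + ↑(Nat.succ k)) ≠ PySem.List.pyGet? (x :: y :: t) ((0:Int) + ↑(Nat.succ k) + 1))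
        = decide (PySem.List.pyGet? (y :: t) ((0:Int) + (k:Int)) ≠ PySem.List.pyGet? (y :: t) ((0:Int) + (k:Int) + 1)) := by
    intro k _
    simp only [zero_add, Nat.cast_succ]
    rw [pvGetShift x (y :: t) k]
    have h2 : ((k : Int) + 1 + 1) = ((k + 1 : Nat) : Int) + 1 := by push_cast; ring
    rw [h2, pvGetShift x (y :: t) (k + 1)]
    have h3 : (((k + 1 : Nat)) : Int) = (k : Int) + 1 := by push_cast; ring
    rw [h3]
  by_cases hxy : x = y
  · have hd : decide (x ≠ y) = false := by simp [hxy]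
    rw [hd, if_neg (by simp), if_pos hxy, List.nil_append]
    rw [List.filter_map, List.filter_map, List.map_map, List.map_map]
    simp only [Function.comp_def]
    rw [List.filter_congr hcond]
    congr 1
  · have hd : decide (x ≠ y) = true := by simp [hxy]
    rw [hd, if_pos rfl, if_neg hxy]
    rw [List.filter_map, List.filter_map, List.map_cons, List.map_map, List.map_map]
    simp only [Function.comp_def]
    rw [List.filter_congr hcond]
    simp only [List.singleton_append]
    congr 1


theorem pvSliceNil (l : List Int) : PySem.List.slice l (some 0) (some 0) = ([] : List Int) := by
  rw [PySem.List.slice_toNat _ le_rfl le_rfl]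
  simp

theorem pvB_main (t : List Int) : ∀ x : Int,
    (pvSliceFoldB (x :: t) (pvCutsB (x :: t) ++ [((x :: t).length : Int)])).1 = pvRuns (x :: t) := by
  induction t with
  | nil =>
    intro x
    have hc : pvCutsB [x] = [] := by
      simp [pvCutsB]
    rw [hc, List.nil_append]
    have h1 : PySem.List.slice [x] (some 0) (some 1) = [x] := by
      rw [PySem.List.slice_toNat _ (by norm_num) (by norm_num)]; simp
    simp [pvSliceFoldB, h1, pvRuns]
  | cons y t ih =>
    intro x
    rw [pvCutsB_cons]
    have hm : ((x :: y :: t).length : Int) = ((y :: t).length : Int) + 1 := by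
      simp only [List.length_cons]; push_cast; ring
    rcases hcs : pvCutsB (y :: t) ++ [((y :: t).length : Int)] with _ | ⟨c, cs'⟩
    · exact absurd hcs (by simp)
    have hnn := pvCutsB_nonneg (y :: t)
    rw [hcs] at hnn
    have hc0 : 0 ≤ c := hnn c (by simp)
    have hcs' : ∀ d ∈ cs', 0 ≤ d := fun d hd => hnn d (by simp [hd])
    have hIH := ih y
    rw [hcs] at hIH
    unfold pvSliceFoldB at hIH
    simp only [List.foldl_cons, List.nil_append] at hIH
    rw [pvFoldB_acc (y :: t)] at hIH
    by_cases hxy : x = y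
    · rw [if_pos hxy, List.nil_append, hm]
      rw [show (pvCutsB (y :: t)).map (· + 1) ++ [((y :: t).length : Int) + 1]
            = ((pvCutsB (y :: t) ++ [((y :: t).length : Int)]).map (· + 1)) by simp]
      rw [hcs]
      unfold pvSliceFoldB
      simp only [List.map_cons, List.foldl_cons, List.nil_append]
      rw [pvSliceCons x (y :: t) c hc0]
      rw [pvFoldB_acc (x :: y :: t)]
      rw [pvFoldB_shift x (y :: t) cs' c hc0 hcs']
      rw [pvRuns, if_pos hxy, ← hIH]
      simp
    · rw [if_neg hxy, hm]
      have hassoc : [(1:Int)] ++ (pvCutsB (y :: t)).map (· + 1) ++ [((y :: t).length : Int) + 1]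
            = 1 :: ((pvCutsB (y :: t) ++ [((y :: t).length : Int)]).map (· + 1)) := by simp
      rw [hassoc, hcs]
      unfold pvSliceFoldB
      simp only [List.map_cons, List.foldl_cons, List.nil_append]
      have h1 : PySem.List.slice (x :: y :: t) (some 0) (some 1) = [x] := by
        have := pvSliceCons x (y :: t) 0 le_rfl
        rw [zero_add] at this
        rw [this, pvSliceNil]
      have hsl : PySem.List.slice (x :: y :: t) (some 1) (some (c + 1))
          = PySem.List.slice (y :: t) (some 0) (some c) := by
        have := pvSliceShift x (y :: t) 0 c le_rfl hc0
        rw [zero_add] at this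
        exact this
      rw [h1, hsl]
      rw [pvFoldB_acc (x :: y :: t)]
      rw [pvFoldB_shift x (y :: t) cs' c hc0 hcs']
      rw [pvRuns, if_neg hxy, ← hIH]
      simp

theorem pvB_eq_runs (array : List Int) (h : array ≠ []) :
    split_array_into_subarrays_py_alt array = pvRuns array := by
  obtain ⟨x, t, rfl⟩ := List.exists_cons_of_ne_nil h
  rw [split_array_into_subarrays_py_alt, if_neg (by simp)]
  exact pvB_main t x

-- ===== VERDICT (by name: the statement is the Claim_ definition above) =====
theorem split_array_into_subarrays_py_spec : Claim_equal_split_array_into_subarrays_py := by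
  intro array _ hpre
  unfold Spec_split_array_into_subarrays_py
  rw [pvA_eq_runs array hpre, pvB_eq_runs array hpre]
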